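-- pv_equiv track=rewrite | github.com/pistolilla/bettermusician | lambdas/chord_progression/handler.py | get_chords_from_scale
-- ===== SOURCE A (Python) =====
-- def get_chords_from_scale(scale):
--     """Generates triads and seventh chords from a scale."""
--     triads = []
--     sevenths = []
--
--     for i in range(len(scale)):
--         root = scale[i]
--         third = scale[(i + 2) % len(scale)]
--         fifth = scale[(i + 4) % len(scale)]
--         triads.append([root, third, fifth])
--         seventh = scale[(i + 6) % len(scale)]  # for 7th chords
--         sevenths.append([root, third, fifth, seventh])
--     return {
--         "triads": triads,
--         "sevenths": sevenths
--     }
-- ===== SOURCE B (Python) =====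
-- def get_chords_from_scale(scale):
--     """Generates triads and seventh chords from a scale.
--
--     Different decomposition: build four rotated copies of the scale
--     (offsets 0,2,4,6 taken modulo the length), zip them into seventh
--     chords, then derive the triads as prefixes of the sevenths."""
--     n = len(scale)
--     if n == 0:
--         return {"triads": [], "sevenths": []}
--     r0, r2, r4, r6 = (scale[k % n:] + scale[:k % n] for k in (0, 2, 4, 6))
--     sevenths = [[a, b, c, d] for a, b, c, d in zip(r0, r2, r4, r6)]
--     triads = [s[:3] for s in sevenths]
--     return {"triads": triads, "sevenths": sevenths}
-- ===== Notes on version B (the rewrite author's own statement) =====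
-- stated objective: alternative
-- what changed: Instead of one index loop computing each chord note by modular indexing, B builds four rotated copies of the scale (offsets 0,2,4,6 mod n), zips them into the sevenths, and derives triads as 3-prefixes of the sevenths.
import Mathlib
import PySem

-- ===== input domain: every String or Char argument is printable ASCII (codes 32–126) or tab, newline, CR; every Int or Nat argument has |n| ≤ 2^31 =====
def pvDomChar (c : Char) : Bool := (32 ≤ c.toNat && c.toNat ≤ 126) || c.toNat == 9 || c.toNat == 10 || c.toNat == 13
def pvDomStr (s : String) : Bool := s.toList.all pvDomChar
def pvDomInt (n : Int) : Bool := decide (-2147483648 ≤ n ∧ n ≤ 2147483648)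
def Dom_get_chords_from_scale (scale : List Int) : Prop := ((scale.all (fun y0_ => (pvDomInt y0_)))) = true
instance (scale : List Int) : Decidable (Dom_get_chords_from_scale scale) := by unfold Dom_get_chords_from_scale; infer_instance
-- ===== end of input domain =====

-- B builds four rotated copies of the scale and zips them into chords instead of
-- A's per-index modular lookups; objective: alternative decomposition (same cost).

-- ===== PORT A =====
-- loop body of A's for-loop; the indices i, (i+2k)%n are always in [0,n) when the
-- loop runs (n > 0), so pyGetD is exact Python indexing here
def pvStepA (scale : List Int) (acc : List (List Int) × List (List Int)) (i : Int) :
    List (List Int) × List (List Int) :=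
  let n : Int := scale.length
  let root := PySem.List.pyGetD scale i 0
  let third := PySem.List.pyGetD scale (PySem.Int.mod (i + 2) n) 0
  let fifth := PySem.List.pyGetD scale (PySem.Int.mod (i + 4) n) 0
  let triads' := acc.1 ++ [[root, third, fifth]]
  let seventh := PySem.List.pyGetD scale (PySem.Int.mod (i + 6) n) 0
  (triads', acc.2 ++ [[root, third, fifth, seventh]])

def get_chords_from_scale (scale : List Int) : List (String × List (List Int)) :=
  let st := (PySem.List.pyRange 0 (scale.length : Int) 1).foldl (pvStepA scale) ([], [])
  [("triads", st.1), ("sevenths", st.2)]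

-- ===== PORT B =====
-- zip(r0, r2, r4, r6) of exactly four lists, yielding the 4-note chords
def pvZip4 : List Int → List Int → List Int → List Int → List (List Int)
  | a :: as, b :: bs, c :: cs, d :: ds => [a, b, c, d] :: pvZip4 as bs cs ds
  | _, _, _, _ => []

-- scale[k % n:] + scale[:k % n]
def pvRot (scale : List Int) (k : Int) : List Int :=
  let m := PySem.Int.mod k (scale.length : Int)
  PySem.List.slice scale (some m) none ++ PySem.List.slice scale none (some m)

def get_chords_from_scale_alt (scale : List Int) : List (String × List (List Int)) :=
  if scale.length = 0 then [("triads", []), ("sevenths", [])]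
  else
    let sevenths := pvZip4 (pvRot scale 0) (pvRot scale 2) (pvRot scale 4) (pvRot scale 6)
    let triads := sevenths.map (fun s => PySem.List.slice s none (some 3))
    [("triads", triads), ("sevenths", sevenths)]

-- ===== PRECONDITION & SPEC =====
def Spec_get_chords_from_scale (scale : List Int) (out : List (String × List (List Int))) : Prop := out = get_chords_from_scale_alt scale
instance (scale : List Int) (out : List (String × List (List Int))) : Decidable (Spec_get_chords_from_scale scale out) := by unfold Spec_get_chords_from_scale; infer_instance

-- ===== CLAIM (what is proved, stated in full; the proofs are below) =====
def Claim_equal_get_chords_from_scale : Prop := ∀ (scale : List Int), Dom_get_chords_from_scale scale → Spec_get_chords_from_scale scale (get_chords_from_scale scale)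

-- ===== LEMMAS AND PROOFS =====

-- the seventh chord at index i, as both programs must produce it
def pvSev (scale : List Int) (i : Nat) : List Int :=
  [scale.getD (i % scale.length) 0, scale.getD ((i + 2) % scale.length) 0,
   scale.getD ((i + 4) % scale.length) 0, scale.getD ((i + 6) % scale.length) 0]

lemma pvStepA_eq (scale : List Int) (i : Nat) (hi : i < scale.length) (acc : List (List Int) × List (List Int)) :
    pvStepA scale acc (i : Int) =
      (acc.1 ++ [(pvSev scale i).take 3], acc.2 ++ [pvSev scale i]) := by
  have h2 : ((i : Int) + 2) = ((i + 2 : Nat) : Int) := by push_cast; ring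
  have h4 : ((i : Int) + 4) = ((i + 4 : Nat) : Int) := by push_cast; ring
  have h6 : ((i : Int) + 6) = ((i + 6 : Nat) : Int) := by push_cast; ring
  simp only [pvStepA, pvSev, h2, h4, h6, PySem.Int.mod_natCast, PySem.List.pyGetD_natCast,
    Nat.mod_eq_of_lt hi, List.take]

lemma pvFoldA (scale : List Int) :
    ∀ (m : Nat), m ≤ scale.length → ∀ (p q : List (List Int)),
      (PySem.List.pyRange 0 (m : Int) 1).foldl (pvStepA scale) (p, q) =
        (p ++ (List.range m).map (fun i => (pvSev scale i).take 3),
         q ++ (List.range m).map (pvSev scale)) := by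
  intro m
  induction m with
  | zero => intro _ p q; simp [PySem.List.pyRange]
  | succ m ih =>
    intro hm p q
    have hc : ((m + 1 : Nat) : Int) = (m : Int) + 1 := by push_cast; ring
    rw [hc, PySem.List.pyRange_one_succ_right (by positivity), List.foldl_append,
      ih (by omega) p q, List.range_succ]
    simp only [List.foldl_cons, List.foldl_nil]
    rw [pvStepA_eq scale m (by omega)]
    simp

lemma pvRot_eq_rotate (scale : List Int) (hn : scale ≠ []) (k : Nat) :
    pvRot scale (k : Int) = scale.rotate (k % scale.length) := by
  have hlt : k % scale.length ≤ scale.length :=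
    le_of_lt (Nat.mod_lt _ (List.length_pos_of_ne_nil hn))
  simp only [pvRot, PySem.Int.mod_natCast, PySem.List.slice_from_natCast,
    PySem.List.slice_to_natCast, List.rotate_eq_drop_append_take hlt]

lemma pvZip4_eq (as : List Int) : ∀ (bs cs ds : List Int),
    bs.length = as.length → cs.length = as.length → ds.length = as.length →
    pvZip4 as bs cs ds =
      (List.range as.length).map (fun j => [as.getD j 0, bs.getD j 0, cs.getD j 0, ds.getD j 0]) := by
  induction as with
  | nil => intro bs cs ds _ _ _; cases bs <;> cases cs <;> cases ds <;> simp [pvZip4]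
  | cons a as ih =>
    intro bs cs ds hb hc hd
    cases bs with
    | nil => simp at hb
    | cons b bs =>
      cases cs with
      | nil => simp at hc
      | cons c cs =>
        cases ds with
        | nil => simp at hd
        | cons d ds =>
          simp only [pvZip4, List.length_cons, List.range_succ_eq_map, List.map_cons,
            List.map_map]
          rw [ih bs cs ds (by simpa using hb) (by simpa using hc) (by simpa using hd)]
          refine List.cons_eq_cons.mpr ⟨by simp [List.getD], ?_⟩
          apply List.map_congr_left
          intro j _
          simp [List.getD]

lemma pvRot_getD (scale : List Int) (hn : scale ≠ []) (k j : Nat) (hj : j < scale.length) :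
    (pvRot scale (k : Int)).getD j 0 = scale.getD ((j + k) % scale.length) 0 := by
  have hpos : 0 < scale.length := List.length_pos_of_ne_nil hn
  rw [pvRot_eq_rotate scale hn k]
  have hlen : (scale.rotate (k % scale.length)).length = scale.length := by simp
  have hj' : j < (scale.rotate (k % scale.length)).length := by omega
  rw [List.getD_eq_getElem _ _ hj', List.getElem_rotate]
  have hmod : (j + k % scale.length) % scale.length = (j + k) % scale.length := by
    conv_rhs => rw [Nat.add_mod]
    rw [Nat.add_mod, Nat.mod_mod_of_dvd]
    exact dvd_refl _
  rw [List.getD_eq_getElem _ _ (by exact Nat.mod_lt _ hpos)]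
  congr 1

lemma pvAlt_eq (scale : List Int) (hn : scale ≠ []) :
    get_chords_from_scale_alt scale =
      [("triads", (List.range scale.length).map (fun i => (pvSev scale i).take 3)),
       ("sevenths", (List.range scale.length).map (pvSev scale))] := by
  have hpos : 0 < scale.length := List.length_pos_of_ne_nil hn
  have hlen : ∀ (k : Nat), (pvRot scale (k : Int)).length = scale.length := by
    intro k
    rw [pvRot_eq_rotate scale hn k]; simp
  have h0 : pvRot scale 0 = pvRot scale ((0 : Nat) : Int) := by norm_num
  have h2 : pvRot scale 2 = pvRot scale ((2 : Nat) : Int) := by norm_num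
  have h4 : pvRot scale 4 = pvRot scale ((4 : Nat) : Int) := by norm_num
  have h6 : pvRot scale 6 = pvRot scale ((6 : Nat) : Int) := by norm_num
  have hz : pvZip4 (pvRot scale 0) (pvRot scale 2) (pvRot scale 4) (pvRot scale 6)
      = (List.range scale.length).map (pvSev scale) := by
    rw [h0, h2, h4, h6, pvZip4_eq _ _ _ _ (by rw [hlen, hlen]) (by rw [hlen, hlen]) (by rw [hlen, hlen]), hlen]
    apply List.map_congr_left
    intro j hj
    have hj' : j < scale.length := List.mem_range.mp hj
    simp only [pvSev, pvRot_getD scale hn _ _ hj']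
    norm_num
  simp only [get_chords_from_scale_alt, hz]
  rw [if_neg (by omega : ¬ scale.length = 0)]
  congr 2
  rw [List.map_map]
  apply List.map_congr_left
  intro j _
  have hs : PySem.List.slice (pvSev scale j) none (some 3) = (pvSev scale j).take 3 := by
    simpa using PySem.List.slice_to_natCast (pvSev scale j) 3
  simp [hs]

-- ===== VERDICT (by name: the statement is the Claim_ definition above) =====
theorem get_chords_from_scale_spec : Claim_equal_get_chords_from_scale := by
  intro scale _
  unfold Spec_get_chords_from_scale
  by_cases hn : scale = []
  · subst hn; rfl
  · rw [pvAlt_eq scale hn]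
    simp only [get_chords_from_scale]
    rw [pvFoldA scale scale.length le_rfl [] []]
    simp
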